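-- pv_equiv track=rewrite | github.com/denissakanovic/program_executable | app.py | distribute_skills
-- ===== SOURCE A (Python) =====
-- def distribute_skills(skills_list, num_of_ques):
--
--   total_skills = len(skills_list)
--
--   ask_list = []
--   for i in range(total_skills):
--     ask_list.append(0)
--
--   counter = num_of_ques
--   while counter > 0:
--     for i in range(total_skills):
--       if counter > 0:
--           ask_list[i] += 1
--           counter -= 1
--
--   # check if asking less questions than skills selected
--   if num_of_ques < len(skills_list):
--     skills_list = skills_list[:num_of_ques]
--     ask_list = ask_list[:num_of_ques]
--
--   return ask_list
-- ===== SOURCE B (Python) =====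
-- def distribute_skills(skills_list, num_of_ques):
--     n = len(skills_list)
--     if n == 0:
--         return []
--     if num_of_ques <= 0:
--         ask = [0] * n
--     else:
--         q, r = divmod(num_of_ques, n)
--         ask = [q + 1] * r + [q] * (n - r)
--     return ask[:num_of_ques] if num_of_ques < n else ask
-- ===== Notes on version B (the rewrite author's own statement) =====
-- stated objective: faster
-- what changed: Replaced the one-question-at-a-time round-robin while loop (O(num_of_ques) increments) by a closed form: divmod gives the base count and the remainder, the first num%n skills get base+1; Pre_ excludes the empty skills_list with positive num_of_ques, on which A loops forever.
import Mathlib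
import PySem

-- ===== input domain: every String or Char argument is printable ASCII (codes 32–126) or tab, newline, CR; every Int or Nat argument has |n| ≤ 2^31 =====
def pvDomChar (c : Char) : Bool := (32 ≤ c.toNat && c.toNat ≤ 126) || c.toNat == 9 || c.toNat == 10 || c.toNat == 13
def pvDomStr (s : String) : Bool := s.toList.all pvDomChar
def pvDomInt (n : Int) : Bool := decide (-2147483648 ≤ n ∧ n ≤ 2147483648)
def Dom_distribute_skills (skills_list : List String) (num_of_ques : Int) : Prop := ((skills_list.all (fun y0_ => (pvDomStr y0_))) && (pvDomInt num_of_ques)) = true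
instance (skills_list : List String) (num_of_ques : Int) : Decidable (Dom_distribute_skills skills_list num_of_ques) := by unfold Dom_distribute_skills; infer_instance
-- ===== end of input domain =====

-- B replaces A's one-question-at-a-time round-robin while loop by the divmod closed form
-- (base = num//n, first num%n skills get base+1); asymptotically faster (O(n) vs O(num_of_ques)).


-- ===== PORT A =====
-- inner 'for i in range(total_skills)' of the while body: state (ask_list, counter)
def pvInner (n : Nat) (st : List Int × Int) : List Int × Int :=
  (List.range n).foldl
    (fun st i => if st.2 > 0 then (st.1.set i (st.1.getD i 0 + 1), st.2 - 1) else st) st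

-- 'while counter > 0' ported with fuel num_of_ques.toNat: the counter drops each pass
-- when total_skills > 0; the diverging case (empty list, positive num) is outside Pre_.
def pvWhile : Nat → List Int → Int → Nat → List Int
  | 0, ask, _, _ => ask
  | fuel + 1, ask, counter, n =>
    if counter > 0 then
      let st := pvInner n (ask, counter)
      pvWhile fuel st.1 st.2 n
    else ask

def distribute_skills (skills_list : List String) (num_of_ques : Int) : List Int :=
  let total_skills := skills_list.length
  let ask_list : List Int := (List.range total_skills).foldl (fun a _ => a ++ [0]) []
  let ask_list := pvWhile num_of_ques.toNat ask_list num_of_ques total_skills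
  if num_of_ques < (skills_list.length : Int) then
    PySem.List.slice ask_list none (some num_of_ques)
  else ask_list

-- ===== PORT B =====
def distribute_skills_alt (skills_list : List String) (num_of_ques : Int) : List Int :=
  let n := skills_list.length
  if n = 0 then []
  else
    let ask : List Int :=
      if num_of_ques ≤ 0 then List.replicate n 0
      else
        let q := PySem.Int.floordiv num_of_ques (n : Int)
        let r := PySem.Int.mod num_of_ques (n : Int)
        List.replicate r.toNat (q + 1) ++ List.replicate (n - r.toNat) q
    if num_of_ques < (n : Int) then PySem.List.slice ask none (some num_of_ques) else ask

-- ===== PRECONDITION & SPEC =====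
-- Pre_ excludes exactly the inputs where A never returns: empty skills_list with
-- num_of_ques > 0 makes A's 'while counter > 0' loop forever.
def Pre_distribute_skills (skills_list : List String) (num_of_ques : Int) : Prop :=
  skills_list ≠ [] ∨ num_of_ques ≤ 0
instance (skills_list : List String) (num_of_ques : Int) : Decidable (Pre_distribute_skills skills_list num_of_ques) := by unfold Pre_distribute_skills; infer_instance

def pvWitness_distribute_skills : List String × Int := (["a", "b"], 3)

def Spec_distribute_skills (skills_list : List String) (num_of_ques : Int) (out : List Int) : Prop := out = distribute_skills_alt skills_list num_of_ques
instance (skills_list : List String) (num_of_ques : Int) (out : List Int) : Decidable (Spec_distribute_skills skills_list num_of_ques out) := by unfold Spec_distribute_skills; infer_instance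

-- ===== CLAIM (what is proved, stated in full; the proofs are below) =====
def Claim_equal_distribute_skills : Prop := ∀ (skills_list : List String) (num_of_ques : Int), Dom_distribute_skills skills_list num_of_ques → Pre_distribute_skills skills_list num_of_ques → Spec_distribute_skills skills_list num_of_ques (distribute_skills skills_list num_of_ques)

-- ===== LEMMAS AND PROOFS =====

-- 'increment the first k entries' — the effect of one partial inner pass
def pvBump : Nat → List Int → List Int
  | 0, L => L
  | _ + 1, [] => []
  | k + 1, x :: xs => (x + 1) :: pvBump k xs

lemma pvBump_getD (L : List Int) : ∀ (k m : Nat), k ≤ m → (pvBump k L).getD m 0 = L.getD m 0 := by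
  induction L with
  | nil => intro k m _; cases k <;> rfl
  | cons x xs ih =>
    intro k m hkm
    cases k with
    | zero => rfl
    | succ k =>
      cases m with
      | zero => omega
      | succ m => simpa [pvBump] using ih k m (by omega)

lemma pvBump_set (L : List Int) : ∀ (m : Nat), m < L.length →
    (pvBump m L).set m (L.getD m 0 + 1) = pvBump (m + 1) L := by
  induction L with
  | nil => intro m hm; simp at hm
  | cons x xs ih =>
    intro m hm
    cases m with
    | zero => rfl
    | succ m => simpa [pvBump] using ih m (by simpa using hm)

lemma pvBump_all (L : List Int) : ∀ (k : Nat), L.length ≤ k → pvBump k L = L.map (· + 1) := by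
  induction L with
  | nil => intro k _; cases k <;> rfl
  | cons x xs ih =>
    intro k hk
    cases k with
    | zero => simp at hk
    | succ k => simpa [pvBump] using ih k (by simpa using hk)

lemma zip_add_refl (M : List Int) :
    List.zipWith (· + ·) M (List.replicate M.length 0) = M := by
  induction M with
  | nil => rfl
  | cons y ys ih => simp [List.replicate_succ, ih]

lemma zip_zero_left (M : List Int) :
    List.zipWith (· + ·) (List.replicate M.length 0) M = M := by
  induction M with
  | nil => rfl
  | cons y ys ih => simp [List.replicate_succ, ih]

lemma pvBump_zip (L : List Int) : ∀ (k : Nat), k ≤ L.length →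
    pvBump k L = List.zipWith (· + ·) L (List.replicate k 1 ++ List.replicate (L.length - k) 0) := by
  induction L with
  | nil => intro k _; cases k <;> rfl
  | cons x xs ih =>
    intro k hk
    cases k with
    | zero => simpa using (zip_add_refl (x :: xs)).symm
    | succ k =>
      have hk' : k ≤ xs.length := by simpa using hk
      simp only [pvBump, List.length_cons, Nat.succ_sub_succ, List.replicate_succ,
        List.cons_append, List.zipWith_cons_cons]
      rw [ih k hk']

lemma pvInner_spec : ∀ (m : Nat) (L : List Int) (c : Int), 0 ≤ c → m ≤ L.length →
    pvInner m (L, c) = (pvBump (min c.toNat m) L, c - min c.toNat m) := by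
  intro m
  induction m with
  | zero => intro L c hc _; simp [pvInner, pvBump]
  | succ m ih =>
    intro L c hc hm
    have h1 : pvInner (m + 1) (L, c)
        = (fun st i => if st.2 > (0 : Int) then (st.1.set i (st.1.getD i 0 + 1), st.2 - 1) else st)
            (pvInner m (L, c)) m := by
      simp [pvInner, List.range_succ]
    rw [h1, ih L c hc (by omega)]
    by_cases hcm : c.toNat ≤ m
    · have hmin : min c.toNat m = c.toNat := by omega
      have hmin' : min c.toNat (m + 1) = c.toNat := by omega
      simp only [hmin, hmin']
      have : ¬ (c - (c.toNat : Int) > 0) := by omega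
      simp [this]
    · have hmin : min c.toNat m = m := by omega
      have hmin' : min c.toNat (m + 1) = m + 1 := by omega
      simp only [hmin, hmin']
      have hpos : c - (m : Int) > 0 := by omega
      rw [if_pos hpos]
      rw [pvBump_getD L m m (le_refl m), pvBump_set L m (by omega)]
      have hc' : c - (m : Int) - 1 = c - ((m + 1 : Nat) : Int) := by push_cast; ring
      rw [hc']

-- the closed-form target list for counter c over n skills
def pvS (c : Int) (n : Nat) : List Int :=
  List.replicate (PySem.Int.mod c n).toNat (PySem.Int.floordiv c n + 1)
    ++ List.replicate (n - (PySem.Int.mod c n).toNat) (PySem.Int.floordiv c n)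

lemma pvS_zero (n : Nat) (hn : 0 < n) : pvS 0 n = List.replicate n 0 := by
  have hn' : (0 : Int) < n := by exact_mod_cast hn
  rw [pvS, PySem.Int.floordiv_eq_ediv_of_pos hn', PySem.Int.mod_eq_emod_of_pos hn']
  simp

lemma pvS_length (c : Int) (n : Nat) (hn : 0 < n) : (pvS c n).length = n := by
  have hn' : (0 : Int) < n := by exact_mod_cast hn
  have h1 : 0 ≤ PySem.Int.mod c n := PySem.Int.mod_nonneg c hn'
  have h2 : PySem.Int.mod c n < n := PySem.Int.mod_lt c hn'
  simp [pvS]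
  omega

lemma pvS_small (c : Int) (n : Nat) (hn : 0 < n) (h0 : 0 ≤ c) (hcn : c < n) :
    pvS c n = List.replicate c.toNat 1 ++ List.replicate (n - c.toNat) 0 := by
  have hn' : (0 : Int) < n := by exact_mod_cast hn
  have hd : PySem.Int.floordiv c n = 0 := by
    rw [PySem.Int.floordiv_eq_ediv_of_pos hn']
    exact Int.ediv_eq_zero_of_lt h0 hcn
  have hm : PySem.Int.mod c n = c := by
    rw [PySem.Int.mod_eq_emod_of_pos hn']
    exact Int.emod_eq_of_lt h0 hcn
  simp [pvS, hd, hm]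

lemma pvS_step (c : Int) (n : Nat) (hn : 0 < n) (hcn : (n : Int) ≤ c) :
    pvS c n = (pvS (c - n) n).map (· + 1) := by
  have hn' : (0 : Int) < n := by exact_mod_cast hn
  have hd : PySem.Int.floordiv c n = PySem.Int.floordiv (c - n) n + 1 := by
    rw [PySem.Int.floordiv_eq_ediv_of_pos hn', PySem.Int.floordiv_eq_ediv_of_pos hn']
    have : c = (c - n) + 1 * n := by ring
    rw [this, Int.add_mul_ediv_right _ _ (by omega : (n : Int) ≠ 0)]
    ring_nf
  have hm : PySem.Int.mod c n = PySem.Int.mod (c - n) n := by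
    rw [PySem.Int.mod_eq_emod_of_pos hn', PySem.Int.mod_eq_emod_of_pos hn']
    conv_lhs => rw [show c = (c - n) + (n : Int) * 1 by ring]
    exact Int.add_mul_emod_self_left _ _ _
  simp [pvS, hd, hm]

lemma zip_add_map_one (L : List Int) : ∀ (M : List Int),
    List.zipWith (· + ·) (L.map (· + 1)) M = List.zipWith (· + ·) L (M.map (· + 1)) := by
  induction L with
  | nil => intro M; simp
  | cons x xs ih =>
    intro M
    cases M with
    | nil => simp
    | cons y ys => simp [List.zipWith, ih ys]; ring

lemma pvWhile_zero (f : Nat) (L : List Int) (n : Nat) : pvWhile f L 0 n = L := by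
  cases f <;> simp [pvWhile]

lemma pvWhile_spec : ∀ (f : Nat) (c : Int) (L : List Int) (n : Nat), 0 < n → L.length = n →
    0 ≤ c → c.toNat ≤ f → pvWhile f L c n = List.zipWith (· + ·) L (pvS c n) := by
  intro f
  induction f with
  | zero =>
    intro c L n hn hL hc hf
    have : c = 0 := by omega
    subst this
    rw [pvWhile_zero, pvS_zero n hn, ← hL, zip_add_refl]
  | succ f ih =>
    intro c L n hn hL hc hf
    by_cases hcpos : c > 0
    · rw [show pvWhile (f + 1) L c n
          = (if c > 0 then
              pvWhile f (pvInner n (L, c)).1 (pvInner n (L, c)).2 n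
            else L) from rfl, if_pos hcpos]
      rw [pvInner_spec n L c hc (by omega)]
      by_cases hbig : n ≤ c.toNat
      · have hmin : min c.toNat n = n := by omega
        simp only [hmin]
        rw [pvBump_all L n (by omega)]
        rw [ih (c - n) _ n hn (by simp [hL]) (by omega) (by omega)]
        rw [zip_add_map_one, ← pvS_step c n hn (by omega)]
      · have hmin : min c.toNat n = c.toNat := by omega
        simp only [hmin]
        have : c - (c.toNat : Int) = 0 := by omega
        rw [this, pvWhile_zero]
        rw [pvBump_zip L c.toNat (by omega), hL,
            pvS_small c n hn hc (by omega)]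
    · have : c = 0 := by omega
      subst this
      rw [pvWhile_zero, pvS_zero n hn, ← hL, zip_add_refl]

lemma init_zeros : ∀ (n : Nat),
    (List.range n).foldl (fun (a : List Int) _ => a ++ [0]) [] = List.replicate n 0 := by
  have h : ∀ (n : Nat) (a : List Int),
      (List.range n).foldl (fun (a : List Int) _ => a ++ [0]) a = a ++ List.replicate n 0 := by
    intro n
    induction n with
    | zero => intro a; simp
    | succ n ih =>
      intro a
      rw [List.range_succ, List.foldl_append, ih, List.replicate_succ']
      simp
  intro n
  simpa using h n []

theorem distribute_skills_spec_aux (skills_list : List String) (num_of_ques : Int)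
    (hpre : Pre_distribute_skills skills_list num_of_ques) :
    distribute_skills skills_list num_of_ques = distribute_skills_alt skills_list num_of_ques := by
  by_cases hnil : skills_list = []
  · subst hnil
    have hnum : num_of_ques ≤ 0 := by
      rcases hpre with h | h
      · exact absurd rfl h
      · exact h
    have ht : num_of_ques.toNat = 0 := by omega
    simp only [distribute_skills, distribute_skills_alt, List.length_nil, ht]
    rw [show (List.range 0).foldl (fun (a : List Int) _ => a ++ [0]) [] = [] from rfl]
    rw [show pvWhile 0 ([] : List Int) num_of_ques 0 = [] from rfl]
    simp [PySem.List.slice]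
  · have hn : 0 < skills_list.length := List.length_pos_iff.mpr hnil
    set n := skills_list.length with hndef
    have hn0 : n ≠ 0 := by omega
    simp only [distribute_skills, distribute_skills_alt, ← hndef, if_neg hn0, init_zeros]
    by_cases hq : num_of_ques ≤ 0
    · have ht : num_of_ques.toNat = 0 := by omega
      rw [ht]
      rw [show pvWhile 0 (List.replicate n 0) num_of_ques n = List.replicate n 0 from rfl]
      simp only [if_pos hq]
    · rw [if_neg hq]
      rw [pvWhile_spec num_of_ques.toNat num_of_ques (List.replicate n 0) n hn
          (by simp) (by omega) (le_refl _)]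
      have hlen : (pvS num_of_ques n).length = n := pvS_length _ _ hn
      rw [show List.replicate n (0 : Int) = List.replicate (pvS num_of_ques n).length 0 by rw [hlen]]
      rw [zip_zero_left]
      rfl

-- ===== VERDICT (by name: the statement is the Claim_ definition above) =====
theorem distribute_skills_spec : Claim_equal_distribute_skills := by
  intro skills_list num_of_ques _ hpre
  exact distribute_skills_spec_aux skills_list num_of_ques hpre
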